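-- pv_equiv track=rewrite | github.com/Warrenpoobear/biotech-screener | scripts/clinicaltrials_gov_refactored.py | get_lead_stage_from_trials
-- ===== SOURCE A (Python) =====
-- def get_lead_stage_from_trials(trials: list) -> str:
--     """
--     Determine most advanced clinical stage from trial list.
--
--     Priority: PHASE4 > PHASE3 > PHASE2 > PHASE1 > EARLY_PHASE1 > NA
--     """
--     stage_priority = {
--         'PHASE4': 1,
--         'PHASE3': 2,
--         'PHASE2': 3,
--         'PHASE1': 4,
--         'EARLY_PHASE1': 5,
--         'NA': 6
--     }
--
--     if not trials:
--         return 'UNKNOWN'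
--
--     # Find most advanced stage
--     lead_stage = 'UNKNOWN'
--     best_priority = 999
--
--     for trial in trials:
--         try:
--             phase = trial.get('protocolSection', {}).get('designModule', {}).get('phases', [])
--             if phase and len(phase) > 0:
--                 trial_phase = phase[0]
--                 priority = stage_priority.get(trial_phase, 999)
--                 if priority < best_priority:
--                     lead_stage = trial_phase
--                     best_priority = priority
--         except (KeyError, IndexError):
--             continue
--
--     # Map to simplified stages
--     stage_map = {
--         'PHASE4': 'COMMERCIAL',
--         'PHASE3': 'PHASE3',
--         'PHASE2': 'PHASE2',
--         'PHASE1': 'PHASE1',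
--         'EARLY_PHASE1': 'PHASE1',
--         'NA': 'UNKNOWN'
--     }
--
--     return stage_map.get(lead_stage, 'UNKNOWN')
-- ===== SOURCE B (Python) =====
-- _PRIORITY = [
--     ('PHASE4', 'COMMERCIAL'),
--     ('PHASE3', 'PHASE3'),
--     ('PHASE2', 'PHASE2'),
--     ('PHASE1', 'PHASE1'),
--     ('EARLY_PHASE1', 'PHASE1'),
--     ('NA', 'UNKNOWN'),
-- ]
--
--
-- def get_lead_stage_from_trials(trials: list) -> str:
--     """Determine most advanced clinical stage from trial list."""
--     if not trials:
--         return 'UNKNOWN'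
--     seen = set()
--     for trial in trials:
--         phases = trial.get('protocolSection', {}).get('designModule', {}).get('phases', [])
--         if phases:
--             seen.add(phases[0])
--     for phase, stage in _PRIORITY:
--         if phase in seen:
--             return stage
--     return 'UNKNOWN'
-- ===== Notes on version B (the rewrite author's own statement) =====
-- stated objective: idiomatic
-- what changed: Replaces the per-trial min-priority scan with stale state (priority dict, best_priority counter, final stage_map lookup) by building a set of lead phases in one pass and then probing a single priority-ordered (phase, stage) table for the first phase present.
import Mathlib
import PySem

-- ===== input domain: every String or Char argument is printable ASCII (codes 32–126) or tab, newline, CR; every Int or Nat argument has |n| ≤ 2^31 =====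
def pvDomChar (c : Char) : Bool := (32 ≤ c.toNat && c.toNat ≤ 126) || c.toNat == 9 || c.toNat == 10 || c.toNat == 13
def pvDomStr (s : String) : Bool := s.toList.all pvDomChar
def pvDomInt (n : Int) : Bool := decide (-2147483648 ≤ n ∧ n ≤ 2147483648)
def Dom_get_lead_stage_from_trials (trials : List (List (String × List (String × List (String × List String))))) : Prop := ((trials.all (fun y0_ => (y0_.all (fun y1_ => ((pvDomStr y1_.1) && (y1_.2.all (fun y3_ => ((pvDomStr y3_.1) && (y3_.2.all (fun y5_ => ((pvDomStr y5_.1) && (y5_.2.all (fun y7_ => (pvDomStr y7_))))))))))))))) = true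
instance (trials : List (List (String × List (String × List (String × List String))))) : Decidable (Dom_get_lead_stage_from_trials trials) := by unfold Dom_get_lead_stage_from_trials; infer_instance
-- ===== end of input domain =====

-- B replaces A's per-trial min-priority scan (priority dict + best_priority + final stage_map lookup)
-- by one pass collecting the set of lead phases, then a probe of a priority-ordered (phase, stage) table.

-- dict.get(k, dflt) on an association list (first match), via the PySem.Dict primitive
def pvGetD {β : Type} (d : List (String × β)) (k : String) (dflt : β) : β :=
  PySem.Dict.getD ⟨d⟩ k dflt

-- ===== PORT A =====
def pvStagePriority : List (String × Int) :=
  [("PHASE4", 1), ("PHASE3", 2), ("PHASE2", 3), ("PHASE1", 4), ("EARLY_PHASE1", 5), ("NA", 6)]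

def pvStageMap : List (String × String) :=
  [("PHASE4", "COMMERCIAL"), ("PHASE3", "PHASE3"), ("PHASE2", "PHASE2"), ("PHASE1", "PHASE1"), ("EARLY_PHASE1", "PHASE1"), ("NA", "UNKNOWN")]

def get_lead_stage_from_trials (trials : List (List (String × List (String × List (String × List String))))) : String :=
  if trials = [] then "UNKNOWN"
  else
    let st := trials.foldl (fun (st : String × Int) trial =>
      let phase := pvGetD (pvGetD (pvGetD trial "protocolSection" []) "designModule" []) "phases" []
      match phase with
      | [] => st
      | trial_phase :: _ =>
        let priority := pvGetD pvStagePriority trial_phase 999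
        if priority < st.2 then (trial_phase, priority) else st) ("UNKNOWN", 999)
    pvGetD pvStageMap st.1 "UNKNOWN"

-- ===== PORT B =====
def pvPriorityTable : List (String × String) :=
  [("PHASE4", "COMMERCIAL"), ("PHASE3", "PHASE3"), ("PHASE2", "PHASE2"), ("PHASE1", "PHASE1"), ("EARLY_PHASE1", "PHASE1"), ("NA", "UNKNOWN")]

def pvProbe : List (String × String) → PySem.Set String → String
  | [], _ => "UNKNOWN"
  | (phase, stage) :: rest, seen => if PySem.Set.contains seen phase then stage else pvProbe rest seen

def get_lead_stage_from_trials_alt (trials : List (List (String × List (String × List (String × List String))))) : String :=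
  if trials = [] then "UNKNOWN"
  else
    let seen := trials.foldl (fun (seen : PySem.Set String) trial =>
      let phases := pvGetD (pvGetD (pvGetD trial "protocolSection" []) "designModule" []) "phases" []
      match phases with
      | [] => seen
      | p :: _ => PySem.Set.add seen p) PySem.Set.empty
    pvProbe pvPriorityTable seen

-- ===== PRECONDITION & SPEC =====
def Spec_get_lead_stage_from_trials (trials : List (List (String × List (String × List (String × List String))))) (out : String) : Prop := out = get_lead_stage_from_trials_alt trials
instance (trials : List (List (String × List (String × List (String × List String))))) (out : String) : Decidable (Spec_get_lead_stage_from_trials trials out) := by unfold Spec_get_lead_stage_from_trials; infer_instance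

-- ===== CLAIM (what is proved, stated in full; the proofs are below) =====
def Claim_equal_get_lead_stage_from_trials : Prop := ∀ (trials : List (List (String × List (String × List (String × List String))))), Dom_get_lead_stage_from_trials trials → Spec_get_lead_stage_from_trials trials (get_lead_stage_from_trials trials)

-- ===== LEMMAS AND PROOFS =====

-- the list of first phases, one per trial with a non-empty phases list
def pvFp (trials : List (List (String × List (String × List (String × List String))))) : List String :=
  trials.filterMap (fun trial =>
    (pvGetD (pvGetD (pvGetD trial "protocolSection" []) "designModule" []) "phases" []).head?)

def pvRank (x : String) : Int := pvGetD pvStagePriority x 999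

def pvStep (st : String × Int) (p : String) : String × Int :=
  if pvRank p < st.2 then (p, pvRank p) else st

-- best priority determined by which of the six phases occur
def pvF (l : List String) : Int :=
  if "PHASE4" ∈ l then 1 else if "PHASE3" ∈ l then 2 else if "PHASE2" ∈ l then 3
  else if "PHASE1" ∈ l then 4 else if "EARLY_PHASE1" ∈ l then 5 else if "NA" ∈ l then 6 else 999

def pvAns (b : Int) : String :=
  if b = 1 then "COMMERCIAL" else if b = 2 then "PHASE3" else if b = 3 then "PHASE2"
  else if b = 4 then "PHASE1" else if b = 5 then "PHASE1" else if b = 6 then "UNKNOWN" else "UNKNOWN"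

lemma pvRank_chain (x : String) :
    pvRank x = if x = "PHASE4" then 1 else if x = "PHASE3" then 2 else if x = "PHASE2" then 3
      else if x = "PHASE1" then 4 else if x = "EARLY_PHASE1" then 5 else if x = "NA" then 6 else 999 := by
  by_cases h1 : x = "PHASE4"; · subst h1; decide
  by_cases h2 : x = "PHASE3"; · subst h2; decide
  by_cases h3 : x = "PHASE2"; · subst h3; decide
  by_cases h4 : x = "PHASE1"; · subst h4; decide
  by_cases h5 : x = "EARLY_PHASE1"; · subst h5; decide
  by_cases h6 : x = "NA"; · subst h6; decide
  have e1 : ("PHASE4" == x) = false := by simp [Ne.symm h1]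
  have e2 : ("PHASE3" == x) = false := by simp [Ne.symm h2]
  have e3 : ("PHASE2" == x) = false := by simp [Ne.symm h3]
  have e4 : ("PHASE1" == x) = false := by simp [Ne.symm h4]
  have e5 : ("EARLY_PHASE1" == x) = false := by simp [Ne.symm h5]
  have e6 : ("NA" == x) = false := by simp [Ne.symm h6]
  simp [pvRank, pvStagePriority, pvGetD, PySem.Dict.getD, PySem.Dict.get?, List.find?,
    e1, e2, e3, e4, e5, e6, h1, h2, h3, h4, h5, h6]

lemma pvStageMap_chain (y : String) :
    pvGetD pvStageMap y "UNKNOWN" =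
      if y = "PHASE4" then "COMMERCIAL" else if y = "PHASE3" then "PHASE3" else if y = "PHASE2" then "PHASE2"
      else if y = "PHASE1" then "PHASE1" else if y = "EARLY_PHASE1" then "PHASE1" else if y = "NA" then "UNKNOWN" else "UNKNOWN" := by
  by_cases h1 : y = "PHASE4"; · subst h1; decide
  by_cases h2 : y = "PHASE3"; · subst h2; decide
  by_cases h3 : y = "PHASE2"; · subst h3; decide
  by_cases h4 : y = "PHASE1"; · subst h4; decide
  by_cases h5 : y = "EARLY_PHASE1"; · subst h5; decide
  by_cases h6 : y = "NA"; · subst h6; decide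
  have e1 : ("PHASE4" == y) = false := by simp [Ne.symm h1]
  have e2 : ("PHASE3" == y) = false := by simp [Ne.symm h2]
  have e3 : ("PHASE2" == y) = false := by simp [Ne.symm h3]
  have e4 : ("PHASE1" == y) = false := by simp [Ne.symm h4]
  have e5 : ("EARLY_PHASE1" == y) = false := by simp [Ne.symm h5]
  have e6 : ("NA" == y) = false := by simp [Ne.symm h6]
  simp [pvStageMap, pvGetD, PySem.Dict.getD, PySem.Dict.get?, List.find?,
    e1, e2, e3, e4, e5, e6, h1, h2, h3, h4, h5, h6]

lemma pvF_bounds (l : List String) : 1 ≤ pvF l ∧ pvF l ≤ 999 := by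
  unfold pvF; split_ifs <;> omega

lemma pvRank_bounds (x : String) : 1 ≤ pvRank x ∧ pvRank x ≤ 999 := by
  rw [pvRank_chain]; split_ifs <;> omega

lemma pvF_cons (x : String) (l : List String) : pvF (x :: l) = min (pvRank x) (pvF l) := by
  rw [pvRank_chain]
  by_cases h1 : x = "PHASE4"
  · subst h1; simp [pvF]; omega
  rw [if_neg h1]
  by_cases h2 : x = "PHASE3"
  · subst h2; simp [pvF, List.mem_cons]; split_ifs <;> omega
  rw [if_neg h2]
  by_cases h3 : x = "PHASE2"
  · subst h3; simp [pvF, List.mem_cons]; split_ifs <;> omega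
  rw [if_neg h3]
  by_cases h4 : x = "PHASE1"
  · subst h4; simp [pvF, List.mem_cons]; split_ifs <;> omega
  rw [if_neg h4]
  by_cases h5 : x = "EARLY_PHASE1"
  · subst h5; simp [pvF, List.mem_cons]; split_ifs <;> omega
  rw [if_neg h5]
  by_cases h6 : x = "NA"
  · subst h6; simp [pvF, List.mem_cons]; split_ifs <;> omega
  rw [if_neg h6]
  simp only [pvF, List.mem_cons, Ne.symm h1, Ne.symm h2, Ne.symm h3, Ne.symm h4, Ne.symm h5, Ne.symm h6,
    false_or]
  omega

lemma pvFold_snd (l : List String) (st : String × Int) (h : st.2 ≤ 999) :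
    (l.foldl pvStep st).2 = min st.2 (pvF l) := by
  induction l generalizing st with
  | nil =>
    have h999 : pvF ([] : List String) = 999 := by simp [pvF]
    simp only [List.foldl_nil, h999]; omega
  | cons x l ih =>
    have hr := pvRank_bounds x
    have hb : (pvStep st x).2 ≤ 999 := by
      unfold pvStep; split_ifs
      · exact hr.2
      · exact h
    rw [List.foldl_cons, ih _ hb, pvF_cons]
    unfold pvStep; split_ifs with hc
    · show min (pvRank x) (pvF l) = min st.2 (min (pvRank x) (pvF l))
      omega
    · omega

def pvInv (st : String × Int) : Prop := pvGetD pvStageMap st.1 "UNKNOWN" = pvAns st.2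

lemma pvInv_step (st : String × Int) (p : String) (h : pvInv st) : pvInv (pvStep st p) := by
  unfold pvStep
  split_ifs with hlt
  · show pvGetD pvStageMap p "UNKNOWN" = pvAns (pvRank p)
    rw [pvStageMap_chain, pvRank_chain]
    split_ifs <;> simp [pvAns]
  · exact h

lemma pvInv_fold (l : List String) (st : String × Int) (h : pvInv st) : pvInv (l.foldl pvStep st) := by
  induction l generalizing st with
  | nil => exact h
  | cons x l ih => exact ih _ (pvInv_step st x h)

lemma pvFoldA_eq (trials : List (List (String × List (String × List (String × List String))))) (st : String × Int) :
    trials.foldl (fun (st : String × Int) trial =>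
      let phase := pvGetD (pvGetD (pvGetD trial "protocolSection" []) "designModule" []) "phases" []
      match phase with
      | [] => st
      | trial_phase :: _ =>
        let priority := pvGetD pvStagePriority trial_phase 999
        if priority < st.2 then (trial_phase, priority) else st) st
    = (pvFp trials).foldl pvStep st := by
  induction trials generalizing st with
  | nil => rfl
  | cons t ts ih =>
    rw [List.foldl_cons]
    cases h : pvGetD (pvGetD (pvGetD t "protocolSection" []) "designModule" []) "phases" [] with
    | nil => simp [pvFp, h, ih]
    | cons p rest => simp [pvFp, h, ih, pvStep, pvRank]

lemma pvFoldB_eq (trials : List (List (String × List (String × List (String × List String))))) (s : PySem.Set String) :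
    trials.foldl (fun (seen : PySem.Set String) trial =>
      let phases := pvGetD (pvGetD (pvGetD trial "protocolSection" []) "designModule" []) "phases" []
      match phases with
      | [] => seen
      | p :: _ => PySem.Set.add seen p) s
    = (pvFp trials).foldl PySem.Set.add s := by
  induction trials generalizing s with
  | nil => rfl
  | cons t ts ih =>
    rw [List.foldl_cons]
    cases h : pvGetD (pvGetD (pvGetD t "protocolSection" []) "designModule" []) "phases" [] with
    | nil => simp [pvFp, h, ih]
    | cons p rest => simp [pvFp, h, ih]

lemma pvProbe_ofList (l : List String) : pvProbe pvPriorityTable (PySem.Set.ofList l) = pvAns (pvF l) := by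
  simp only [pvProbe, pvPriorityTable, pvF]
  simp [PySem.Set.contains_eq_listContains, PySem.Set.mem_ofList]
  split_ifs <;> simp_all [pvAns]

-- ===== VERDICT (by name: the statement is the Claim_ definition above) =====
theorem get_lead_stage_from_trials_spec : Claim_equal_get_lead_stage_from_trials := by
  intro trials _
  unfold Spec_get_lead_stage_from_trials get_lead_stage_from_trials get_lead_stage_from_trials_alt
  by_cases h : trials = []
  · simp [h]
  · simp only [if_neg h]
    rw [pvFoldA_eq, pvFoldB_eq]
    have hset : (pvFp trials).foldl PySem.Set.add PySem.Set.empty = PySem.Set.ofList (pvFp trials) :=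
      (PySem.Set.ofList_eq_foldl _).symm
    rw [hset, pvProbe_ofList]
    have hinv := pvInv_fold (pvFp trials) ("UNKNOWN", 999) (by unfold pvInv; decide)
    have hsnd := pvFold_snd (pvFp trials) ("UNKNOWN", 999) (by norm_num)
    have hb := pvF_bounds (pvFp trials)
    unfold pvInv at hinv
    rw [hinv, hsnd]
    have : min ((999 : Int)) (pvF (pvFp trials)) = pvF (pvFp trials) := by omega
    rw [this]
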